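-- pv_equiv track=rewrite | github.com/RUCDM/KB4Rec | Projects/UPGAN/code/util/triple_kernel.py | make_kg_graph_batch
-- ===== SOURCE A (Python) =====
-- def make_kg_graph_batch(path_list, max_hop, ent_hop, hop_map):
--     kg_graph = {}
--     for i in range(1, max_hop):
--         kg_list = {}
--         tp_ent = []
--         entity_map_pre = hop_map[i - 1]
--         entity_map_now = hop_map[i]
--         assert len(entity_map_now) == len(ent_hop[i])
--         r_ht = {}
--         for ent in ent_hop[i]:
--             tp_ent.append(ent)
--             rt_list = path_list[ent]
--             for rt in rt_list:
--                 rel, tail = rt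
--                 r_ht.setdefault(rel, [])
--                 r_ht[rel].append((ent, tail))
--         for rel in r_ht:
--             head_list = []
--             tail_list = []
--             for ht in r_ht[rel]:
--                 head, tail = ht
--                 head_list.append(entity_map_now[head])
--                 tail_list.append(entity_map_pre[tail])
--             kg_list[rel] = [head_list, tail_list]
--         kg_graph[i] = (kg_list, tp_ent)
--     return kg_graph
-- ===== SOURCE B (Python) =====
-- def make_kg_graph_batch(path_list, max_hop, ent_hop, hop_map):
--     # Two-phase declarative rebuild: flatten all (rel, ent, tail) triples of the hop,
--     # dedupe relations in first-seen order, then build each relation's index lists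
--     # by comprehension filters -- no incremental dict mutation at all.
--     kg_graph = {}
--     for i in range(1, max_hop):
--         pre, now, ents = hop_map[i - 1], hop_map[i], ent_hop[i]
--         assert len(now) == len(ents)
--         triples = [(rel, ent, tail) for ent in ents for rel, tail in path_list[ent]]
--         kg_list = {rel: [[now[e] for r, e, _ in triples if r == rel],
--                          [pre[t] for r, _, t in triples if r == rel]]
--                    for rel in dict.fromkeys(r for r, _, _ in triples)}
--         kg_graph[i] = (kg_list, list(ents))
--     return kg_graph
-- ===== Notes on version B (the rewrite author's own statement) =====
-- stated objective: alternative
-- what changed: B replaces A's incremental dict building (r_ht grouping table filled by setdefault/append, then a second per-relation loop) with a declarative two-phase rebuild: flatten the hop into one (rel, ent, tail) triple list, dedupe relations in first-seen order, and construct each relation's head/tail index lists directly by comprehension filters.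
import Mathlib
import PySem

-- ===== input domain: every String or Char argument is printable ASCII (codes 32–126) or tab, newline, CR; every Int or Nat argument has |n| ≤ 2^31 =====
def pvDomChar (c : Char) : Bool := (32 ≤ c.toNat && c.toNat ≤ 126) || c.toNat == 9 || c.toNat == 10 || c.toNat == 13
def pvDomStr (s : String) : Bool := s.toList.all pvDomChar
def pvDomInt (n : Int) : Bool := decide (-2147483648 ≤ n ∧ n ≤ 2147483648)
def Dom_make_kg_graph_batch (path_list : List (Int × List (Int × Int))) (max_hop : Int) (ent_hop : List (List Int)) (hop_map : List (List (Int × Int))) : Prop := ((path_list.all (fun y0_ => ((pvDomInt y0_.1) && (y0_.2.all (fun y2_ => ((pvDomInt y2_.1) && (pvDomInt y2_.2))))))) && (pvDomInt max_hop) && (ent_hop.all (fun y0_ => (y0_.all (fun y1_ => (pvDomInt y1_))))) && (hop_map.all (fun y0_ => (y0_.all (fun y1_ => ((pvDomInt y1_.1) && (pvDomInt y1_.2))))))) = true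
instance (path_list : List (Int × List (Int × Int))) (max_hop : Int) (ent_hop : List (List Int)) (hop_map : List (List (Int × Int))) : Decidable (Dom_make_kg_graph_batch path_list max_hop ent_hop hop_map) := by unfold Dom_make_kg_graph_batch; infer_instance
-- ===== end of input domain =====

-- B replaces A's incremental dict building (r_ht grouping table, then a second per-relation
-- loop) with a declarative two-phase rebuild: flatten the hop into a triple list, dedupe
-- relations first-seen, build each relation's lists by comprehension filters (objective: alternative).

-- ===== PORT A =====
-- Literal port of A. dicts are PySem.Dict (assoc lists); the assert and every
-- indexing/lookup that can raise are guaranteed to succeed by Pre_, so lookups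
-- use the total getD/pyGetD forms.
def make_kg_graph_batch (path_list : List (Int × List (Int × Int))) (max_hop : Int) (ent_hop : List (List Int)) (hop_map : List (List (Int × Int))) : List (Int × (List (Int × List (List Int))) × List Int) :=
  (PySem.List.pyRange 1 max_hop 1).foldl (fun kg_graph i =>
    -- first loop: tp_ent and the r_ht grouping table, one pass over ent_hop[i]
    let st := (PySem.List.pyGetD ent_hop i []).foldl
      (fun (s : List Int × PySem.Dict Int (List (Int × Int))) ent =>
        (s.1 ++ [ent],
         ((PySem.Dict.mk path_list).getD ent []).foldl
           (fun r_ht rt => r_ht.modify rt.1 [] (· ++ [(ent, rt.2)])) s.2))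
      ([], PySem.Dict.empty)
    -- second loop: for rel in r_ht, build head_list/tail_list from r_ht[rel]
    let kg_list := st.2.keys.foldl
      (fun (kg : PySem.Dict Int (List (List Int))) rel =>
        kg.insert rel
          [(st.2.getD rel []).foldl
             (fun acc ht => acc ++ [(PySem.Dict.mk (PySem.List.pyGetD hop_map i [])).getD ht.1 0]) [],
           (st.2.getD rel []).foldl
             (fun acc ht => acc ++ [(PySem.Dict.mk (PySem.List.pyGetD hop_map (i - 1) [])).getD ht.2 0]) []])
      PySem.Dict.empty
    kg_graph ++ [(i, (kg_list.items, st.1))]) []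

-- ===== PORT B =====
-- Literal port of Source B: per hop, flatten the (rel, ent, tail) triples, dedupe the
-- relations in first-seen order (dict.fromkeys = PySem.Set.ofList), and build the
-- dict comprehension as a map over the distinct relations with filter comprehensions.
def make_kg_graph_batch_alt (path_list : List (Int × List (Int × Int))) (max_hop : Int) (ent_hop : List (List Int)) (hop_map : List (List (Int × Int))) : List (Int × (List (Int × List (List Int))) × List Int) :=
  (PySem.List.pyRange 1 max_hop 1).map (fun i =>
    let pre := PySem.Dict.mk (PySem.List.pyGetD hop_map (i - 1) [])
    let now := PySem.Dict.mk (PySem.List.pyGetD hop_map i [])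
    let ents := PySem.List.pyGetD ent_hop i []
    let triples := ents.flatMap (fun ent =>
      ((PySem.Dict.mk path_list).getD ent []).map (fun rt => (rt.1, ent, rt.2)))
    (i,
     ((PySem.Set.ofList (triples.map (·.1))).map (fun rel =>
        (rel, [(triples.filter (fun p => p.1 == rel)).map (fun p => now.getD p.2.1 0),
               (triples.filter (fun p => p.1 == rel)).map (fun p => pre.getD p.2.2 0)])),
      ents)))

-- ===== PRECONDITION & SPEC =====
-- Pre_: exactly the inputs on which the Python A returns normally: every hop i in
-- range(1, max_hop) is a valid index into hop_map and ent_hop (equivalently, the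
-- range is empty or max_hop ≤ both lengths), the assert len(hop_map[i]) == len(ent_hop[i])
-- holds (dict length = number of DISTINCT keys), every ent of ent_hop[i] is a key of
-- path_list and of hop_map[i], and every tail reached from it is a key of hop_map[i-1]
-- (otherwise A raises an IndexError, AssertionError or KeyError).
def Pre_make_kg_graph_batch (path_list : List (Int × List (Int × Int))) (max_hop : Int) (ent_hop : List (List Int)) (hop_map : List (List (Int × Int))) : Prop :=
  (if max_hop ≤ (hop_map.length : Int) ∧ max_hop ≤ (ent_hop.length : Int) then
    (PySem.List.pyRange 1 max_hop 1).all (fun i =>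
      (PySem.Set.ofList ((PySem.List.pyGetD hop_map i []).map (·.1))).length
        == (PySem.List.pyGetD ent_hop i []).length &&
      (PySem.List.pyGetD ent_hop i []).all (fun ent =>
        (PySem.Dict.mk path_list).contains ent &&
        (PySem.Dict.mk (PySem.List.pyGetD hop_map i [])).contains ent &&
        ((PySem.Dict.mk path_list).getD ent []).all (fun rt =>
          (PySem.Dict.mk (PySem.List.pyGetD hop_map (i - 1) [])).contains rt.2)))
   else decide (max_hop ≤ 1)) = true
instance (path_list : List (Int × List (Int × Int))) (max_hop : Int) (ent_hop : List (List Int)) (hop_map : List (List (Int × Int))) : Decidable (Pre_make_kg_graph_batch path_list max_hop ent_hop hop_map) := by unfold Pre_make_kg_graph_batch; infer_instance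

def pvWitness_make_kg_graph_batch : (List (Int × List (Int × Int))) × Int × List (List Int) × (List (List (Int × Int))) :=
  ([(0, [(5, 1), (6, 2)]), (1, [(5, 0)]), (2, [])], 2,
   [[0], [0, 1, 2]],
   [[(1, 10), (2, 20), (0, 7)], [(0, 3), (1, 4), (2, 5)]])

def Spec_make_kg_graph_batch (path_list : List (Int × List (Int × Int))) (max_hop : Int) (ent_hop : List (List Int)) (hop_map : List (List (Int × Int))) (out : List (Int × (List (Int × List (List Int))) × List Int)) : Prop := out = make_kg_graph_batch_alt path_list max_hop ent_hop hop_map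
instance (path_list : List (Int × List (Int × Int))) (max_hop : Int) (ent_hop : List (List Int)) (hop_map : List (List (Int × Int))) (out : List (Int × (List (Int × List (List Int))) × List Int)) : Decidable (Spec_make_kg_graph_batch path_list max_hop ent_hop hop_map out) := by unfold Spec_make_kg_graph_batch; infer_instance

-- ===== CLAIM (what is proved, stated in full; the proofs are below) =====
def Claim_equal_make_kg_graph_batch : Prop := ∀ (path_list : List (Int × List (Int × Int))) (max_hop : Int) (ent_hop : List (List Int)) (hop_map : List (List (Int × Int))), Dom_make_kg_graph_batch path_list max_hop ent_hop hop_map → Pre_make_kg_graph_batch path_list max_hop ent_hop hop_map → Spec_make_kg_graph_batch path_list max_hop ent_hop hop_map (make_kg_graph_batch path_list max_hop ent_hop hop_map)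

-- ===== LEMMAS AND PROOFS =====

theorem pvWitness_ok :
    Dom_make_kg_graph_batch pvWitness_make_kg_graph_batch.1 pvWitness_make_kg_graph_batch.2.1
      pvWitness_make_kg_graph_batch.2.2.1 pvWitness_make_kg_graph_batch.2.2.2 ∧
    Pre_make_kg_graph_batch pvWitness_make_kg_graph_batch.1 pvWitness_make_kg_graph_batch.2.1
      pvWitness_make_kg_graph_batch.2.2.1 pvWitness_make_kg_graph_batch.2.2.2 := by decide

-- pvE: the per-hop stream of (rel, head, tail) events both ports process
def pvE (pl : List (Int × List (Int × Int))) (ents : List Int) : List (Int × Int × Int) :=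
  ents.flatMap (fun ent => ((PySem.Dict.mk pl).getD ent []).map (fun rt => (rt.1, ent, rt.2)))

-- A's nested grouping loop is a single fold over the flattened triple stream
theorem flatA (pl : List (Int × List (Int × Int))) (ents : List Int)
    (d0 : PySem.Dict Int (List (Int × Int))) :
    ents.foldl (fun d ent => ((PySem.Dict.mk pl).getD ent []).foldl
      (fun r rt => r.modify rt.1 [] (· ++ [(ent, rt.2)])) d) d0
    = (pvE pl ents).foldl (fun d p => d.modify p.1 [] (· ++ [p.2])) d0 := by
  rw [pvE, List.foldl_flatMap]
  congr 1
  funext d ent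
  rw [List.foldl_map]

-- A's per-hop body equals B's per-hop tuple (unconditionally)
theorem body_eq (pl : List (Int × List (Int × Int))) (now pre : PySem.Dict Int Int) (ents : List Int) :
    (let stA := ents.foldl (fun (s : List Int × PySem.Dict Int (List (Int × Int))) ent =>
        (s.1 ++ [ent], ((PySem.Dict.mk pl).getD ent []).foldl
          (fun r rt => r.modify rt.1 [] (· ++ [(ent, rt.2)])) s.2)) ([], PySem.Dict.empty)
     ((stA.2.keys.foldl (fun (kg : PySem.Dict Int (List (List Int))) rel =>
        kg.insert rel
          [(stA.2.getD rel []).foldl (fun acc ht => acc ++ [now.getD ht.1 0]) [],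
           (stA.2.getD rel []).foldl (fun acc ht => acc ++ [pre.getD ht.2 0]) []])
        PySem.Dict.empty).items, stA.1))
    = ((PySem.Set.ofList ((pvE pl ents).map (·.1))).map (fun rel =>
          (rel, [((pvE pl ents).filter (fun p => p.1 == rel)).map (fun p => now.getD p.2.1 0),
                 ((pvE pl ents).filter (fun p => p.1 == rel)).map (fun p => pre.getD p.2.2 0)])),
        ents) := by
  simp only []
  have hsplitA : ents.foldl (fun (s : List Int × PySem.Dict Int (List (Int × Int))) ent =>
      (s.1 ++ [ent], ((PySem.Dict.mk pl).getD ent []).foldl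
        (fun r rt => r.modify rt.1 [] (· ++ [(ent, rt.2)])) s.2)) ([], PySem.Dict.empty)
      = (ents.foldl (fun tp ent => tp ++ [ent]) [],
         ents.foldl (fun d ent => ((PySem.Dict.mk pl).getD ent []).foldl
           (fun r rt => r.modify rt.1 [] (· ++ [(ent, rt.2)])) d) PySem.Dict.empty) :=
    PySem.List.foldl_prod_mk (fun tp ent => tp ++ [ent])
      (fun d ent => ((PySem.Dict.mk pl).getD ent []).foldl
        (fun r rt => r.modify rt.1 [] (· ++ [(ent, rt.2)])) d) ents [] PySem.Dict.empty
  rw [hsplitA, flatA]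
  refine Prod.ext ?_ (by rw [PySem.List.foldl_append_singleton_eq_self]; rfl)
  simp only []
  set E := pvE pl ents with hE
  set r_ht := E.foldl (fun d p => d.modify p.1 [] (· ++ [p.2])) PySem.Dict.empty with hr
  have hndR : r_ht.keys.Nodup := by
    rw [hr]
    exact PySem.Dict.nodup_keys_foldl_modify_key E (fun p => p.1) [] (fun _ p v => v ++ [p.2]) _ PySem.Dict.nodup_keys_empty
  have hkeys : r_ht.keys = PySem.Set.ofList (E.map (·.1)) := by
    rw [hr, PySem.Dict.keys_foldl_modify_key E (fun p => p.1) [] (fun _ p v => v ++ [p.2])]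
    rfl
  have hA := PySem.Dict.items_foldl_insert_fresh r_ht.keys (fun a => a)
    (fun rel => [(r_ht.getD rel []).foldl (fun acc ht => acc ++ [now.getD ht.1 0]) [],
                 (r_ht.getD rel []).foldl (fun acc ht => acc ++ [pre.getD ht.2 0]) []])
    PySem.Dict.empty (fun a _ => PySem.Dict.contains_empty _)
    (by simpa using hndR)
  rw [hA]
  simp only [show (PySem.Dict.empty : PySem.Dict Int (List (List Int))).items = [] from rfl, List.nil_append]
  rw [hkeys]
  refine List.map_congr_left ?_
  intro rel _
  have hgR : r_ht.getD rel [] = (E.filter (fun p => p.1 == rel)).map (fun p => p.2) := by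
    rw [hr, PySem.Dict.getD_foldl_modify_append, PySem.Dict.getD_empty, List.nil_append]
  simp only [PySem.List.foldl_append_singleton_eq_map, List.nil_append, hgR, List.map_map]
  simp [Function.comp_def]

-- ===== VERDICT (by name: the statement is the Claim_ definition above) =====
theorem make_kg_graph_batch_spec : Claim_equal_make_kg_graph_batch := by
  intro pl mh eh hm _ _
  unfold Spec_make_kg_graph_batch make_kg_graph_batch make_kg_graph_batch_alt
  rw [PySem.List.foldl_append_singleton_eq_map, List.nil_append]
  refine List.map_congr_left ?_
  intro i _
  simp only []
  have h := body_eq pl (PySem.Dict.mk (PySem.List.pyGetD hm i []))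
    (PySem.Dict.mk (PySem.List.pyGetD hm (i - 1) [])) (PySem.List.pyGetD eh i [])
  simp only [] at h
  rw [show (PySem.List.pyGetD eh i []).flatMap (fun ent =>
      ((PySem.Dict.mk pl).getD ent []).map (fun rt => (rt.1, ent, rt.2))) = pvE pl (PySem.List.pyGetD eh i []) from rfl]
  exact congrArg (fun p => (i, p)) h
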